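-- pv_equiv track=rewrite | github.com/TGPJonathon/swc | swc/cli.py | byte_or_char
-- ===== SOURCE A (Python) =====
-- from typing import List, Tuple
--
-- def byte_or_char(ordered_params: List[str]):
--     """Determines the last recognized parameter from a list of ordered parameters.
--
--     This function iterates over a list of parameters and identifies the last
--     recognized parameter, either 'count' or 'chars'. It ignores any unrecognized
--     parameters. The Linux WC command's output varies depending on the order
--     -c and -m are passed to it.
--
--     Args:
--         ordered_params (List[str]): A list of parameters, where each parameter
--             is a string. The function recognizes 'count' and 'chars' as valid
--             parameters.
--
--     Returns:
--         str: The last recognized parameter ('count' or 'chars'). If neither is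
--             found, returns None.
--
--     Example:
--         >>> byte_or_char(["size", "count", "volume", "chars"])
--         'chars'
--         >>> byte_or_char(["size", "volume", "shape"])
--         None
--
--     """
--     last_param = None
--
--     for param in ordered_params:
--         if param == "count":
--             last_param = "count"
--         if param == "chars":
--             last_param = "chars"
--
--     return last_param
-- ===== SOURCE B (Python) =====
-- def byte_or_char(ordered_params):
--     for param in reversed(ordered_params):
--         if param in ("count", "chars"):
--             return param
--     return None
-- ===== Notes on version B (the rewrite author's own statement) =====
-- stated objective: simpler
-- what changed: Replaces the forward loop that accumulates the last recognized parameter with a backward scan that returns the first match immediately (early exit).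
import Mathlib
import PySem

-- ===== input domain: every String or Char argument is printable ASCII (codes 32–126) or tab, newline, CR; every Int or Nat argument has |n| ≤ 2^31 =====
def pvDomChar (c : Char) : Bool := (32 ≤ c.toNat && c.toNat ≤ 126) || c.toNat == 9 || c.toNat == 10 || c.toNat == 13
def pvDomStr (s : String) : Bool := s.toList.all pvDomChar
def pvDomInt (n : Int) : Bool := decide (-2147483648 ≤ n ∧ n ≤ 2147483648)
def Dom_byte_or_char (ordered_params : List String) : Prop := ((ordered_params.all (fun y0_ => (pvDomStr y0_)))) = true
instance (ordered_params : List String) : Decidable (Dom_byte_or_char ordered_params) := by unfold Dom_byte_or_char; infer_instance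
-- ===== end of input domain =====

-- B replaces A's forward last-match accumulation with a backward early-return first-match scan (simpler control flow).


-- ===== PORT A =====
def byte_or_char (ordered_params : List String) : Option String :=
  ordered_params.foldl
    (fun last_param param =>
      let last_param := if param == "count" then some "count" else last_param
      if param == "chars" then some "chars" else last_param)
    none

-- ===== PORT B =====
-- B: scan the list backwards and return the first recognized parameter.
def byte_or_char_alt_go : List String → Option String
  | [] => none
  | param :: rest =>
      if param == "count" || param == "chars" then some param
      else byte_or_char_alt_go rest

def byte_or_char_alt (ordered_params : List String) : Option String :=
  byte_or_char_alt_go ordered_params.reverse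

-- ===== PRECONDITION & SPEC =====
def Spec_byte_or_char (ordered_params : List String) (out : Option String) : Prop := out = byte_or_char_alt ordered_params
instance (ordered_params : List String) (out : Option String) : Decidable (Spec_byte_or_char ordered_params out) := by unfold Spec_byte_or_char; infer_instance

-- ===== CLAIM (what is proved, stated in full; the proofs are below) =====
def Claim_equal_byte_or_char : Prop := ∀ (ordered_params : List String), Dom_byte_or_char ordered_params → Spec_byte_or_char ordered_params (byte_or_char ordered_params)

-- ===== LEMMAS AND PROOFS =====

-- ===== VERDICT (by name: the statement is the Claim_ definition above) =====
theorem go_append (xs : List String) (x : String) :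
    byte_or_char_alt_go (xs ++ [x]) =
      match byte_or_char_alt_go xs with
      | some p => some p
      | none => byte_or_char_alt_go [x] := by
  induction xs with
  | nil => simp [byte_or_char_alt_go]
  | cons y ys ih =>
      by_cases h : (y == "count" || y == "chars") = true <;>
        simp [byte_or_char_alt_go, h, ih]

theorem foldl_eq_go (xs : List String) (acc : Option String) :
    xs.foldl
      (fun last_param param =>
        let last_param := if param == "count" then some "count" else last_param
        if param == "chars" then some "chars" else last_param)
      acc =
      match byte_or_char_alt_go xs.reverse with
      | some p => some p
      | none => acc := by
  induction xs generalizing acc with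
  | nil => simp [byte_or_char_alt_go]
  | cons x t ih =>
      simp only [List.foldl_cons, List.reverse_cons, go_append, ih]
      by_cases hc : x = "count" <;> by_cases hh : x = "chars" <;>
        cases hgo : byte_or_char_alt_go t.reverse <;>
          simp_all [byte_or_char_alt_go]

theorem byte_or_char_spec : Claim_equal_byte_or_char := by
  intro ordered_params _
  show byte_or_char ordered_params = byte_or_char_alt ordered_params
  unfold byte_or_char byte_or_char_alt
  rw [foldl_eq_go]
  cases byte_or_char_alt_go ordered_params.reverse <;> rfl
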